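-- pv_equiv track=rewrite | github.com/MarcinKonowalczyk/psll-lang | ll2pyra.py | combine_trees
-- ===== SOURCE A (Python) =====
-- from itertools import zip_longest
--
-- def combine_trees(trees,space='.'):
--     '''
--     Put multiple trees side by side
--     '''
--     while len(trees)>1:
--         tree_left = trees[0].split('\n')
--         tree_right = trees[1].split('\n')
--
--         fillvalue = space*len(tree_left[0]) if len(tree_left)<len(tree_right) else space*len(tree_right[0])
--         combined = [l+r for l,r in zip_longest(tree_left,tree_right,fillvalue=fillvalue)]
--
--         combined = ['\n'.join(combined)]
--         trees = combined + trees[2:]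
--     return trees[0]
-- ===== SOURCE B (Python) =====
-- def combine_trees(trees, space='.'):
--     '''
--     Put multiple trees side by side (single row-major pass over a pad table)
--     '''
--     if len(trees) <= 1:
--         return trees[0]
--     rows = [t.split('\n') for t in trees]
--     pads = [space * len(r[0]) for r in rows]
--     height = max(len(r) for r in rows)
--     return '\n'.join(
--         ''.join(r[i] if i < len(r) else p for r, p in zip(rows, pads))
--         for i in range(height)
--     )
-- ===== Notes on version B (the rewrite author's own statement) =====
-- stated objective: simpler
-- what changed: Replaces the repeated pairwise combine-first-two/rejoin/resplit while loop with one split of every tree, a precomputed per-tree pad string, and a single row-major pass that joins all trees line by line.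
-- outside the precondition, e.g. on combine_trees(['a', 'b\nc', 'd'], '\n'): A returns 'abd\n\n\nc\n', B returns 'abd\n\nc\n'
import Mathlib
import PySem

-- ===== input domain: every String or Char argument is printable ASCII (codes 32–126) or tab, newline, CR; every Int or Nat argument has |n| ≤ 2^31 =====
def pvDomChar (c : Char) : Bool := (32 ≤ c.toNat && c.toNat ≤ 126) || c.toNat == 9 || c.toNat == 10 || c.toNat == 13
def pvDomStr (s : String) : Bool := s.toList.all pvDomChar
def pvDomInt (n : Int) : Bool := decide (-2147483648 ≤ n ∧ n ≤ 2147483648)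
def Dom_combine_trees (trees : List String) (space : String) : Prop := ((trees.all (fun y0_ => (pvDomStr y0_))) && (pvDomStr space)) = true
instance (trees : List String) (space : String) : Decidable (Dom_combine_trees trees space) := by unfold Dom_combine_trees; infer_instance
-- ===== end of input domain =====

-- B replaces A's pairwise fold (combine first two trees, re-join, re-split, repeat) by one split of
-- every tree plus a per-tree pad table and a single row-major pass; objective: simpler.

-- ===== SHARED PRIMITIVE HELPERS (both Pythons call .split('\n') and space*n) =====

-- t.split('\n')
def pvSplitNL (cs : List Char) : List (List Char) := PySem.Chars.splitOn cs ['\n']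

-- space * n
def pvFill (sp : List Char) (n : Nat) : List Char := PySem.List.pyRepeat sp (n : Int)

-- ===== PORT A =====

-- [l+r for l,r in zip_longest(left, right, fillvalue=fill)]
def pvZipCat : List (List Char) → List (List Char) → List Char → List (List Char)
  | [], [], _ => []
  | [], y :: ys, f => (f ++ y) :: pvZipCat [] ys f
  | x :: xs, [], f => (x ++ f) :: pvZipCat xs [] f
  | x :: xs, y :: ys, f => (x ++ y) :: pvZipCat xs ys f

-- one iteration of A's while body on trees[0], trees[1]
def pvCombineTwo (a b sp : List Char) : List Char :=
  let L := pvSplitNL a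
  let R := pvSplitNL b
  let fill := if L.length < R.length then pvFill sp (L.headD []).length
              else pvFill sp (R.headD []).length
  PySem.Chars.join ['\n'] (pvZipCat L R fill)

-- the while-loop: len(trees) > 1 keeps folding the first two trees into one
def pvLoopA : List (List Char) → List Char → List Char
  | [], _ => []                 -- Python raises IndexError at trees[0] here (outside Pre_)
  | [t], _ => t
  | a :: b :: rest, sp => pvLoopA (pvCombineTwo a b sp :: rest) sp
termination_by ts _ => ts.length
decreasing_by simp

def combine_trees (trees : List String) (space : String) : String :=
  String.ofList (pvLoopA (trees.map String.toList) space.toList)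

-- ===== PORT B =====

-- max(len(r) for r in rows)
def pvMaxLen (rows : List (List (List Char))) : Nat :=
  rows.foldl (fun m r => max m r.length) 0

-- the ≥ 2 trees branch of Source B: rows, pads, then one row-major pass
def pvBody (ts : List (List Char)) (sp : List Char) : List Char :=
  let rows := ts.map pvSplitNL
  let pads := rows.map (fun r => pvFill sp (r.headD []).length)
  PySem.Chars.join ['\n'] ((List.range (pvMaxLen rows)).map (fun i =>
    PySem.Chars.join [] ((rows.zip pads).map (fun rp => rp.1.getD i rp.2))))

def combine_trees_alt (trees : List String) (space : String) : String :=
  match trees with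
  | [] => ""                    -- Python raises IndexError at trees[0] here (outside Pre_)
  | [t] => t
  | _ => String.ofList (pvBody (trees.map String.toList) space.toList)

-- ===== PRECONDITION & SPEC =====
-- Pre_ excludes the empty list (A raises IndexError at trees[0]) and, as a defensible-corner
-- artefact, fill strings containing a newline when there are three or more trees: there A's
-- join/re-split round-trip re-splits its own pad rows and the output's row structure depends on
-- the fold order — a degenerate fill string for which neither behaviour is specified; B keeps
-- the flat one-row-per-line reading.
def Pre_combine_trees (trees : List String) (space : String) : Prop :=
  trees ≠ [] ∧ (trees.length ≤ 2 ∨ '\n' ∉ space.toList)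
instance (trees : List String) (space : String) : Decidable (Pre_combine_trees trees space) := by
  unfold Pre_combine_trees; infer_instance

def pvWitness_combine_trees : List String × String := (["ab", "c\nd"], ".")

def Spec_combine_trees (trees : List String) (space : String) (out : String) : Prop := out = combine_trees_alt trees space
instance (trees : List String) (space : String) (out : String) : Decidable (Spec_combine_trees trees space out) := by unfold Spec_combine_trees; infer_instance

-- ===== CLAIM (what is proved, stated in full; the proofs are below) =====
def Claim_equal_combine_trees : Prop := ∀ (trees : List String) (space : String), Dom_combine_trees trees space → Pre_combine_trees trees space → Spec_combine_trees trees space (combine_trees trees space)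

-- ===== LEMMAS AND PROOFS =====

-- PySem's fuel-based splitOn on sep = ['\n'] is List.splitOnP (· == '\n')
theorem pv_go_eq (fuel : Nat) (l cur : List Char) (acc : List (List Char))
    (h : l.length < fuel) :
    PySem.Chars.splitOn.go ['\n'] fuel l cur acc
      = acc.reverse ++ (l.splitOnP (· == '\n')).modifyHead (cur.reverse ++ ·) := by
  induction fuel generalizing l cur acc with
  | zero => omega
  | succ n ih =>
    cases l with
    | nil => simp [PySem.Chars.splitOn.go]
    | cons c rest =>
      by_cases hc : c = '\n'
      · subst hc
        have hpre : ['\n'].isPrefixOf ('\n' :: rest) = true := by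
          simp [List.isPrefixOf]
        rw [PySem.Chars.splitOn.go]
        simp only [hpre, if_true, List.length_cons, List.length_nil, List.drop_succ_cons,
          List.drop_zero] at *
        rw [ih rest [] (cur.reverse :: acc) (by omega)]
        obtain ⟨hd, tl, hht⟩ := List.exists_cons_of_ne_nil (List.splitOnP_ne_nil (· == '\n') rest)
        simp [hht, List.splitOnP_cons]
      · have hpre : ['\n'].isPrefixOf (c :: rest) = false := by
          simp [List.isPrefixOf]; intro hh; exact absurd hh.symm hc
        rw [PySem.Chars.splitOn.go]
        simp only [hpre, Bool.false_eq_true, if_false]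
        rw [ih rest (c :: cur) acc (by simp at h ⊢; omega)]
        obtain ⟨hd, tl, hht⟩ := List.exists_cons_of_ne_nil (List.splitOnP_ne_nil (· == '\n') rest)
        have hcb : (c == '\n') = false := by simpa using hc
        simp [hht, List.splitOnP_cons, hcb]

theorem pvSplitNL_eq (cs : List Char) : pvSplitNL cs = cs.splitOn '\n' := by
  unfold pvSplitNL PySem.Chars.splitOn
  rw [pv_go_eq cs.length.succ cs [] [] (by omega)]
  obtain ⟨hd, tl, hht⟩ := List.exists_cons_of_ne_nil (List.splitOnP_ne_nil (· == '\n') cs)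
  simp [List.splitOn, hht]

theorem pvSplitNL_ne_nil (cs : List Char) : pvSplitNL cs ≠ [] := by
  rw [pvSplitNL_eq]; exact List.splitOnP_ne_nil _ _

theorem pv_splitOnP_free {α : Type} (p : α → Bool) (xs : List α) :
    ∀ l ∈ xs.splitOnP p, ∀ y ∈ l, p y = false := by
  induction xs with
  | nil => simp
  | cons x xs ih =>
    by_cases hx : p x
    · simp only [List.splitOnP_cons, hx, if_true]
      intro l hl
      rcases List.mem_cons.mp hl with hl | hl
      · simp [hl]
      · exact ih l hl
    · simp only [List.splitOnP_cons, hx, Bool.false_eq_true, if_false]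
      obtain ⟨hd, tl, hht⟩ := List.exists_cons_of_ne_nil (List.splitOnP_ne_nil p xs)
      rw [hht]
      intro l hl
      rcases List.mem_cons.mp hl with hl | hl
      · subst hl
        intro y hy
        rcases List.mem_cons.mp hy with hy | hy
        · subst hy; simpa using hx
        · exact ih hd (by simp [hht]) y hy
      · exact ih l (by rw [hht]; exact List.mem_cons_of_mem _ hl)

theorem pvSplitNL_free (cs : List Char) : ∀ r ∈ pvSplitNL cs, '\n' ∉ r := by
  rw [pvSplitNL_eq]
  intro r hr hmem
  have := pv_splitOnP_free (· == '\n') cs r hr '\n' hmem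
  simp at this

-- split('\n') undoes '\n'.join on newline-free nonempty row lists
theorem pv_roundtrip (parts : List (List Char)) (hne : parts ≠ [])
    (hfree : ∀ r ∈ parts, '\n' ∉ r) :
    pvSplitNL (PySem.Chars.join ['\n'] parts) = parts := by
  rw [pvSplitNL_eq]
  show (List.intercalate ['\n'] parts).splitOn '\n' = parts
  exact List.splitOn_intercalate (ls := parts) '\n' hfree hne

theorem pv_join_nil_flatten (l : List (List Char)) :
    PySem.Chars.join [] l = l.flatten := by
  induction l with
  | nil => simp [PySem.Chars.join_nil]
  | cons x xs ih =>
    cases xs with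
    | nil => simp [PySem.Chars.join_singleton]
    | cons y ys => rw [PySem.Chars.join_cons_cons]; simp [ih]

-- pvFill facts
theorem pvFill_free (sp : List Char) (n : Nat) (hsp : '\n' ∉ sp) : '\n' ∉ pvFill sp n := by
  unfold pvFill PySem.List.pyRepeat
  intro hmem
  rw [List.mem_flatten] at hmem
  obtain ⟨l, hl, hc⟩ := hmem
  rw [List.mem_replicate] at hl
  exact hsp (hl.2 ▸ hc)

theorem pvFill_eq (sp : List Char) (n : Nat) :
    pvFill sp n = (List.replicate n sp).flatten := by
  unfold pvFill PySem.List.pyRepeat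
  rw [Int.toNat_natCast]

theorem pvFill_add (sp : List Char) (m n : Nat) :
    pvFill sp (m + n) = pvFill sp m ++ pvFill sp n := by
  rw [pvFill_eq, pvFill_eq, pvFill_eq, List.replicate_add, List.flatten_append]

-- pvZipCat facts
theorem pvZipCat_length (L R : List (List Char)) (f : List Char) :
    (pvZipCat L R f).length = max L.length R.length := by
  induction L generalizing R with
  | nil =>
    induction R with
    | nil => simp [pvZipCat]
    | cons y ys ihR => simp [pvZipCat, ihR]
  | cons x xs ih =>
    cases R with
    | nil =>
      have : (pvZipCat xs [] f).length = max xs.length 0 := ih []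
      simp [pvZipCat, this]
    | cons y ys => simp [pvZipCat, ih ys]

theorem pvZipCat_free (L R : List (List Char)) (f : List Char)
    (hL : ∀ x ∈ L, '\n' ∉ x) (hR : ∀ y ∈ R, '\n' ∉ y) (hf : '\n' ∉ f) :
    ∀ z ∈ pvZipCat L R f, '\n' ∉ z := by
  induction L generalizing R with
  | nil =>
    induction R with
    | nil => simp [pvZipCat]
    | cons y ys ihR =>
      intro z hz
      simp only [pvZipCat] at hz
      rcases List.mem_cons.mp hz with hz | hz
      · subst hz
        intro h
        rcases List.mem_append.mp h with h | h
        · exact hf h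
        · exact hR y (by simp) h
      · exact ihR (fun y hy => hR y (by simp [hy])) z hz
  | cons x xs ih =>
    cases R with
    | nil =>
      intro z hz
      simp only [pvZipCat] at hz
      rcases List.mem_cons.mp hz with hz | hz
      · subst hz
        intro h
        rcases List.mem_append.mp h with h | h
        · exact hL x (by simp) h
        · exact hf h
      · exact ih [] (fun u hu => hL u (by simp [hu])) (by simp) z hz
    | cons y ys =>
      intro z hz
      simp only [pvZipCat] at hz
      rcases List.mem_cons.mp hz with hz | hz
      · subst hz
        intro h
        rcases List.mem_append.mp h with h | h
        · exact hL x (by simp) h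
        · exact hR y (by simp) h
      · exact ih ys (fun u hu => hL u (by simp [hu])) (fun v hv => hR v (by simp [hv])) z hz

-- the heart: each combined row is the two trees' own cells side by side
theorem pvZipCat_getD (L R : List (List Char)) (f padA padB : List Char)
    (h1 : L.length < R.length → f = padA) (h2 : R.length < L.length → f = padB) :
    ∀ i, (pvZipCat L R f).getD i (padA ++ padB) = L.getD i padA ++ R.getD i padB := by
  induction L generalizing R with
  | nil =>
    induction R with
    | nil => intro i; simp [pvZipCat]
    | cons y ys ihR =>
      have hf : f = padA := h1 (by simp)
      subst hf
      intro i
      cases i with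
      | zero => simp [pvZipCat]
      | succ j =>
        simp only [pvZipCat, List.getD_cons_succ]
        exact ihR (fun _ => rfl) (by simp) j
  | cons x xs ih =>
    cases R with
    | nil =>
      have hf : f = padB := h2 (by simp)
      subst hf
      intro i
      cases i with
      | zero => simp [pvZipCat]
      | succ j =>
        simp only [pvZipCat, List.getD_cons_succ]
        exact ih [] (by simp) (fun _ => rfl) j
    | cons y ys =>
      intro i
      cases i with
      | zero => simp [pvZipCat]
      | succ j =>
        simp only [pvZipCat, List.getD_cons_succ]
        exact ih ys (fun h => h1 (by simpa using h)) (fun h => h2 (by simpa using h)) j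

theorem pvMaxLen_cons (r : List (List Char)) (rs : List (List (List Char))) :
    pvMaxLen (r :: rs) = max r.length (pvMaxLen rs) := by
  have aux : ∀ (l : List (List (List Char))) (c : Nat),
      l.foldl (fun m r => max m r.length) c
        = max c (l.foldl (fun m r => max m r.length) 0) := by
    intro l
    induction l with
    | nil => intro c; simp
    | cons a as iha =>
      intro c
      simp only [List.foldl_cons]
      rw [iha (max c a.length), iha (max 0 a.length)]
      omega
  unfold pvMaxLen
  simp only [List.foldl_cons]
  rw [aux]
  omega

theorem pv_body_singleton (x sp : List Char) : pvBody [x] sp = x := by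
  unfold pvBody
  simp only [List.map_cons, List.map_nil, List.zip_cons_cons, List.zip_nil_right,
    pvMaxLen_cons, PySem.Chars.join_singleton]
  have h0 : pvMaxLen ([] : List (List (List Char))) = 0 := rfl
  rw [h0]
  simp only [Nat.max_zero]
  have hmap : (List.range (pvSplitNL x).length).map
      (fun i => (pvSplitNL x).getD i (pvFill sp ((pvSplitNL x).headD []).length))
        = pvSplitNL x := by
    apply List.ext_getElem
    · simp
    · intro i h1 h2
      simp only [List.getElem_map, List.getElem_range]
      exact List.getD_eq_getElem _ _ h2
  rw [hmap]
  show List.intercalate ['\n'] (pvSplitNL x) = x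
  rw [pvSplitNL_eq]
  exact List.intercalate_splitOn (xs := x) '\n'

-- one step of A's fold does not change B's row-major reading
theorem pv_body_step (a b sp : List Char) (rest : List (List Char)) (hsp : '\n' ∉ sp) :
    pvBody (pvCombineTwo a b sp :: rest) sp = pvBody (a :: b :: rest) sp := by
  obtain ⟨l0, L', hL⟩ := List.exists_cons_of_ne_nil (pvSplitNL_ne_nil a)
  obtain ⟨r0, R', hR⟩ := List.exists_cons_of_ne_nil (pvSplitNL_ne_nil b)
  set L := pvSplitNL a with hLdef
  set R := pvSplitNL b with hRdef
  set fill := if L.length < R.length then pvFill sp (L.headD []).length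
              else pvFill sp (R.headD []).length with hfilldef
  set Z := pvZipCat L R fill with hZdef
  have hfill_free : '\n' ∉ fill := by
    rw [hfilldef]; split <;> exact pvFill_free _ _ hsp
  have hZ_free : ∀ z ∈ Z, '\n' ∉ z :=
    pvZipCat_free L R fill (pvSplitNL_free a) (pvSplitNL_free b) hfill_free
  have hZ_ne : Z ≠ [] := by
    intro hcon
    have := pvZipCat_length L R fill
    rw [← hZdef, hcon, hL] at this
    simp at this
    omega
  have hcomb : pvSplitNL (pvCombineTwo a b sp) = Z := by
    unfold pvCombineTwo
    rw [← hLdef, ← hRdef]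
    simp only [← hfilldef, ← hZdef]
    exact pv_roundtrip Z hZ_ne hZ_free
  have hZhead : Z.headD [] = l0 ++ r0 := by
    rw [hZdef, hL, hR]; simp [pvZipCat]
  have hpad : pvFill sp (Z.headD []).length
      = pvFill sp (L.headD []).length ++ pvFill sp (R.headD []).length := by
    rw [hZhead, hL, hR]
    simp only [List.headD_cons, List.length_append]
    exact pvFill_add sp l0.length r0.length
  have hcell : ∀ i, Z.getD i (pvFill sp (L.headD []).length ++ pvFill sp (R.headD []).length)
      = L.getD i (pvFill sp (L.headD []).length) ++ R.getD i (pvFill sp (R.headD []).length) := by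
    apply pvZipCat_getD
    · intro h; rw [hfilldef, if_pos h]
    · intro h; rw [hfilldef, if_neg (by omega)]
  -- unfold both bodies
  unfold pvBody
  simp only [List.map_cons, List.zip_cons_cons, pvMaxLen_cons, hcomb]
  rw [pvZipCat_length L R fill]
  rw [← hLdef, ← hRdef]
  congr 1
  have hH : max (max L.length R.length) (pvMaxLen (rest.map pvSplitNL))
      = max L.length (max R.length (pvMaxLen (rest.map pvSplitNL))) := by omega
  rw [hH]
  apply List.map_congr_left
  intro i _
  rw [pv_join_nil_flatten, pv_join_nil_flatten]
  simp only [List.flatten_cons]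
  rw [hpad, hcell i, List.append_assoc]

-- with exactly two trees no intermediate tree is ever re-split, so any fill string works
theorem pv_two_eq (a b sp : List Char) : pvLoopA [a, b] sp = pvBody [a, b] sp := by
  obtain ⟨l0, L', hL⟩ := List.exists_cons_of_ne_nil (pvSplitNL_ne_nil a)
  obtain ⟨r0, R', hR⟩ := List.exists_cons_of_ne_nil (pvSplitNL_ne_nil b)
  set L := pvSplitNL a with hLdef
  set R := pvSplitNL b with hRdef
  set padA := pvFill sp (L.headD []).length with hpadA
  set padB := pvFill sp (R.headD []).length with hpadB
  set fill := if L.length < R.length then padA else padB with hfilldef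
  have hrows : pvZipCat L R fill
      = (List.range (max L.length R.length)).map (fun i => L.getD i padA ++ R.getD i padB) := by
    apply List.ext_getElem
    · simp [pvZipCat_length]
    · intro i h1 h2
      rw [← List.getD_eq_getElem (pvZipCat L R fill) (padA ++ padB) h1,
        pvZipCat_getD L R fill padA padB (fun h => by rw [hfilldef, if_pos h])
          (fun h => by rw [hfilldef, if_neg (by omega)]) i]
      simp
  have hloop : pvLoopA [a, b] sp = PySem.Chars.join ['\n'] (pvZipCat L R fill) := by
    rw [pvLoopA, pvLoopA]
    rfl
  rw [hloop, hrows]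
  unfold pvBody
  simp only [List.map_cons, List.map_nil, List.zip_cons_cons, List.zip_nil_right,
    pvMaxLen_cons, ← hLdef, ← hRdef, ← hpadA, ← hpadB]
  have h0 : pvMaxLen ([] : List (List (List Char))) = 0 := rfl
  rw [h0]
  simp only [Nat.max_zero]
  congr 1
  apply List.map_congr_left
  intro i _
  rw [PySem.Chars.join_cons_cons, PySem.Chars.join_singleton]
  simp

theorem pv_loop_eq (ts : List (List Char)) (sp : List Char)
    (hne : ts ≠ []) (hsp : '\n' ∉ sp) : pvLoopA ts sp = pvBody ts sp := by
  induction hlen : ts.length using Nat.strong_induction_on generalizing ts with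
  | _ n ih =>
    match ts, hne with
    | [t], _ => rw [pv_body_singleton]; simp [pvLoopA]
    | a :: b :: rest, _ =>
      rw [pvLoopA]
      rw [ih (rest.length + 1) (by simp at hlen; omega) (pvCombineTwo a b sp :: rest)
        (by simp) (by simp)]
      exact pv_body_step a b sp rest hsp

-- ===== VERDICT (by name: the statement is the Claim_ definition above) =====
theorem combine_trees_spec : Claim_equal_combine_trees := by
  intro trees space _ hpre
  obtain ⟨hne, hnl⟩ := hpre
  unfold Spec_combine_trees combine_trees combine_trees_alt
  match trees, hne, hnl with
  | [t], _, _ =>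
    simp only [List.map_cons, List.map_nil]
    rw [pvLoopA]
    exact String.ofList_toList
  | [a, b], _, _ =>
    simp only [List.map_cons, List.map_nil]
    rw [pv_two_eq]
  | a :: b :: c :: rest, _, hnl =>
    have hnl' : '\n' ∉ space.toList := by
      rcases hnl with h | h
      · simp at h
      · exact h
    simp only [List.map_cons]
    rw [pv_loop_eq _ _ (by simp) hnl']
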